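-- pv_equiv track=rewrite | github.com/yudong-94/Fundamentals-of-Computing-in-Python | Algorithmic thinking/assignment/module1/degree_distribution.py | compute_in_degrees
-- ===== SOURCE A (Python) =====
-- def compute_in_degrees(digraph):
--     '''
--     for a given directed graph,
--     compute in_degrees for each nodes,
--     and return as a dictionary.
--     '''
--     degrees = {}
--     for node in digraph:
--         counter = 0
--         for node_2 in digraph:
--             if node in digraph[node_2]:
--                 counter += 1
--         degrees[node] = counter
--     return degrees
-- ===== SOURCE B (Python) =====
-- def compute_in_degrees(digraph):
--     '''
--     for a given directed graph,
--     compute in_degrees for each nodes,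
--     and return as a dictionary.
--     '''
--     degrees = {node: 0 for node in digraph}
--     for adj in digraph.values():
--         for head in dict.fromkeys(adj):
--             if head in degrees:
--                 degrees[head] += 1
--     return degrees
-- ===== Notes on version B (the rewrite author's own statement) =====
-- stated objective: faster
-- what changed: Replaces A's nested scan (for every node, re-scan every adjacency list testing membership) with one linear pass over the edges: pre-initialize every node to 0, then for each adjacency list bump the count of each distinct head that is a node of the graph.
import Mathlib
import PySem

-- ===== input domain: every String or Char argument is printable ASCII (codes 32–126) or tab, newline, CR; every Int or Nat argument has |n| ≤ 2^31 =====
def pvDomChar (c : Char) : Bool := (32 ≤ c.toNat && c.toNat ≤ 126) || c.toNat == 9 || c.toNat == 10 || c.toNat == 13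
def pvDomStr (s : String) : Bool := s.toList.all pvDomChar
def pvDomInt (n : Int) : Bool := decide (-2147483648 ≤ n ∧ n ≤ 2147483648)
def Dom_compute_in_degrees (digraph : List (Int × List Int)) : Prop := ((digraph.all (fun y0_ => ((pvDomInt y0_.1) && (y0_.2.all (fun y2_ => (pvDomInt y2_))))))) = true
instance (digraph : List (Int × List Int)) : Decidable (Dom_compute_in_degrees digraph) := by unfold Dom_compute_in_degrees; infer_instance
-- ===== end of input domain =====

-- B replaces A's quadratic node-by-node membership scan with a single pass over the
-- adjacency lists that bumps a pre-initialized count table (faster).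

-- ===== PORT A =====
-- 'for node in digraph' iterates the dict's keys in order; 'digraph[node_2]' is a dict
-- lookup (always present, since node_2 is a key), ported as getD with an unused default.
def compute_in_degrees (digraph : List (Int × List Int)) : List (Int × Int) :=
  (digraph.foldl
    (fun (degrees : PySem.Dict Int Int) node =>
      let counter : Int := digraph.foldl
        (fun counter node_2 =>
          if node.1 ∈ (PySem.Dict.mk digraph).getD node_2.1 [] then counter + 1 else counter)
        0
      degrees.insert node.1 counter)
    PySem.Dict.empty).items

-- ===== PORT B =====
-- the loop body 'if head in degrees: degrees[head] += 1'
def pvBump (degrees : PySem.Dict Int Int) (head : Int) : PySem.Dict Int Int :=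
  if degrees.contains head then degrees.insert head (degrees.getD head 0 + 1) else degrees

def compute_in_degrees_alt (digraph : List (Int × List Int)) : List (Int × Int) :=
  let degrees : PySem.Dict Int Int :=
    digraph.foldl (fun d node => d.insert node.1 0) PySem.Dict.empty
  (digraph.foldl
    (fun degrees adj => (PySem.List.dedup adj.2).foldl pvBump degrees)
    degrees).items

-- ===== PRECONDITION & SPEC =====
-- Pre_ only excludes association lists with duplicate keys: the Python argument is a
-- dict, whose key list is always duplicate-free, so no Python input is excluded.
def Pre_compute_in_degrees (digraph : List (Int × List Int)) : Prop :=
  (digraph.map Prod.fst).Nodup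
instance (digraph : List (Int × List Int)) : Decidable (Pre_compute_in_degrees digraph) := by
  unfold Pre_compute_in_degrees; infer_instance

def pvWitness_compute_in_degrees : (List (Int × List Int)) := [(1, [2, 2, 3]), (2, [1]), (3, [])]

def Spec_compute_in_degrees (digraph : List (Int × List Int)) (out : List (Int × Int)) : Prop := out = compute_in_degrees_alt digraph
instance (digraph : List (Int × List Int)) (out : List (Int × Int)) : Decidable (Spec_compute_in_degrees digraph out) := by unfold Spec_compute_in_degrees; infer_instance

-- ===== CLAIM (what is proved, stated in full; the proofs are below) =====
def Claim_equal_compute_in_degrees : Prop := ∀ (digraph : List (Int × List Int)), Dom_compute_in_degrees digraph → Pre_compute_in_degrees digraph → Spec_compute_in_degrees digraph (compute_in_degrees digraph)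

-- ===== LEMMAS AND PROOFS =====

-- counting fold = countP
theorem pv_foldl_count {α : Type} (P : α → Bool) (l : List α) :
    ∀ acc : Int, l.foldl (fun c a => if P a then c + 1 else c) acc = acc + (l.countP P : Int) := by
  induction l with
  | nil => simp
  | cons a l ih =>
    intro acc
    simp only [List.foldl_cons, List.countP_cons, ih]
    by_cases h : P a <;> simp [h] <;> omega

-- dict lookup of a key of a nodup association list gives its value
theorem pv_getD_mk (L : List (Int × List Int)) (h : (L.map Prod.fst).Nodup)
    (q : Int × List Int) (hq : q ∈ L) :
    (PySem.Dict.mk L).getD q.1 [] = q.2 := by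
  exact PySem.Dict.getD_of_mem_items (PySem.Dict.mk L) hq (by simpa [PySem.Dict.keys] using h) []

-- count of an element in a deduplicated list
theorem pv_count_dedup (l : List Int) (a : Int) :
    (PySem.List.dedup l).count a = if a ∈ l then 1 else 0 := by
  by_cases h : a ∈ l
  · simp only [h, if_true]
    exact List.count_eq_one_of_mem (PySem.List.nodup_dedup l) (by simpa [PySem.List.mem_dedup] using h)
  · simp only [h, if_false]
    exact List.count_eq_zero_of_not_mem (by simpa [PySem.List.mem_dedup] using h)

-- B's inner loop over a head list S, on a table whose items are L keyed by f
theorem pv_bump_fold (L : List (Int × List Int)) (hnd : (L.map Prod.fst).Nodup)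
    (S : List Int) :
    ∀ (f : Int → Int) (d : PySem.Dict Int Int),
      d.items = L.map (fun p => (p.1, f p.1)) →
      (S.foldl pvBump d).items = L.map (fun p => (p.1, f p.1 + (S.count p.1 : Int))) := by
  induction S with
  | nil => intro f d hd; simpa using hd
  | cons h S ih =>
    intro f d hd
    have hkeys : d.keys = L.map Prod.fst := by
      simp [PySem.Dict.keys, hd, Function.comp]
    have hknd : d.keys.Nodup := by rw [hkeys]; exact hnd
    simp only [List.foldl_cons]
    by_cases hc : d.contains h = true
    · -- h is a key: increment in place
      have hmem : h ∈ L.map Prod.fst := by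
        rw [← hkeys]; exact (PySem.Dict.contains_iff_mem_keys d h).1 hc
      have hget : d.getD h 0 = f h := by
        obtain ⟨p, hp, hph⟩ := List.mem_map.1 hmem
        have : (h, f h) ∈ d.items := by
          rw [hd]; exact List.mem_map.2 ⟨p, hp, by rw [hph]⟩
        exact PySem.Dict.getD_of_mem_items d this hknd 0
      have hstep : (pvBump d h).items =
          L.map (fun p => (p.1, (if p.1 = h then f p.1 + 1 else f p.1))) := by
        simp only [pvBump, hc, if_true]
        rw [PySem.Dict.items_insert_of_contains d (d.getD h 0 + 1) hc, hd, hget, List.map_map]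
        refine List.map_congr_left (fun p hp => ?_)
        by_cases hph : p.1 = h <;> simp [hph]
      have := ih (fun k => if k = h then f k + 1 else f k) (pvBump d h) hstep
      rw [this]
      refine List.map_congr_left (fun p hp => ?_)
      by_cases hph : p.1 = h <;> simp [hph, List.count_cons] <;> omega
    · -- h is not a key: dict unchanged, and no p.1 equals h
      have hnotmem : h ∉ L.map Prod.fst := by
        rw [← hkeys]; exact fun hm => hc ((PySem.Dict.contains_iff_mem_keys d h).2 hm)
      have hstep : pvBump d h = d := by simp [pvBump, hc]
      rw [hstep, ih f d hd]
      refine List.map_congr_left (fun p hp => ?_)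
      have hph : p.1 ≠ h := fun e => hnotmem (e ▸ List.mem_map.2 ⟨p, hp, rfl⟩)
      simp [Ne.symm hph]

-- B's outer loop over the suffix 'rest' of adjacency lists
theorem pv_outer_fold (L : List (Int × List Int)) (hnd : (L.map Prod.fst).Nodup)
    (rest : List (Int × List Int)) :
    ∀ (f : Int → Int) (d : PySem.Dict Int Int),
      d.items = L.map (fun p => (p.1, f p.1)) →
      (rest.foldl (fun degrees adj => (PySem.List.dedup adj.2).foldl pvBump degrees) d).items
        = L.map (fun p => (p.1, f p.1 + (rest.countP (fun q => decide (p.1 ∈ q.2)) : Int))) := by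
  induction rest with
  | nil => intro f d hd; simpa using hd
  | cons q rest ih =>
    intro f d hd
    simp only [List.foldl_cons]
    have h1 := pv_bump_fold L hnd (PySem.List.dedup q.2) f d hd
    have h2 := ih (fun k => f k + (((PySem.List.dedup q.2).count k : Nat) : Int))
      ((PySem.List.dedup q.2).foldl pvBump d) h1
    rw [h2]
    refine List.map_congr_left (fun p hp => ?_)
    simp only [List.countP_cons, pv_count_dedup]
    by_cases hm : p.1 ∈ q.2 <;> simp [hm] <;> omega

-- ===== VERDICT (by name: the statement is the Claim_ definition above) =====
theorem compute_in_degrees_spec : Claim_equal_compute_in_degrees := by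
  intro digraph _ hpre
  unfold Spec_compute_in_degrees compute_in_degrees compute_in_degrees_alt
  have hnd : (digraph.map Prod.fst).Nodup := hpre
  -- A's result: fresh distinct keys appended one by one
  have hA : (digraph.foldl
      (fun (degrees : PySem.Dict Int Int) node =>
        let counter : Int := digraph.foldl
          (fun counter node_2 =>
            if node.1 ∈ (PySem.Dict.mk digraph).getD node_2.1 [] then counter + 1 else counter)
          0
        degrees.insert node.1 counter)
      PySem.Dict.empty).items
      = digraph.map (fun p => (p.1, digraph.foldl
          (fun counter node_2 =>
            if p.1 ∈ (PySem.Dict.mk digraph).getD node_2.1 [] then counter + 1 else counter)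
          (0 : Int))) := by
    have := PySem.Dict.items_foldl_insert_fresh (l := digraph) (k := Prod.fst)
      (v := fun node => digraph.foldl
          (fun counter node_2 =>
            if node.1 ∈ (PySem.Dict.mk digraph).getD node_2.1 [] then counter + 1 else counter)
          (0 : Int))
      (d := PySem.Dict.empty)
      (by intro a _; simp [PySem.Dict.contains_empty]) hnd
    simpa using this
  rw [hA]
  -- B's initial table
  have hB0 : (digraph.foldl (fun (d : PySem.Dict Int Int) node => d.insert node.1 0)
        PySem.Dict.empty).items = digraph.map (fun p => (p.1, (fun _ : Int => (0 : Int)) p.1)) := by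
    have := PySem.Dict.items_foldl_insert_fresh (l := digraph) (k := Prod.fst)
      (v := fun _ => (0 : Int)) (d := PySem.Dict.empty)
      (by intro a _; simp [PySem.Dict.contains_empty]) hnd
    simpa using this
  rw [pv_outer_fold digraph hnd digraph (fun _ => 0) _ hB0]
  refine List.map_congr_left (fun p hp => ?_)
  have hcnt := pv_foldl_count
    (fun node_2 => decide (p.1 ∈ (PySem.Dict.mk digraph).getD node_2.1 [])) digraph 0
  simp only [decide_eq_true_eq] at hcnt
  rw [hcnt]
  have : digraph.countP (fun node_2 => decide (p.1 ∈ (PySem.Dict.mk digraph).getD node_2.1 []))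
      = digraph.countP (fun q => decide (p.1 ∈ q.2)) := by
    apply List.countP_congr
    intro q hq
    simp [pv_getD_mk digraph hnd q hq]
  simp [this]
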